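-- pv_equiv track=rewrite | github.com/maxrichardson250902/lab-notes | features/cloning/router.py | _check_internal_sites
-- ===== SOURCE A (Python) =====
-- def _check_internal_sites(seq: str, site: str, rc_site: str) -> list:
--     """Check for internal enzyme recognition sites in a fragment."""
--     seq_upper = seq.upper()
--     positions = []
--     for pattern in [site, rc_site]:
--         pos = 0
--         while True:
--             idx = seq_upper.find(pattern, pos)
--             if idx == -1:
--                 break
--             positions.append(idx)
--             pos = idx + 1
--     return positions
-- ===== SOURCE B (Python) =====
-- def _check_internal_sites(seq: str, site: str, rc_site: str) -> list:
--     """Single index scan: check both patterns with startswith at every position."""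
--     seq_upper = seq.upper()
--     site_hits = []
--     rc_hits = []
--     for i in range(len(seq_upper) + 1):
--         if seq_upper.startswith(site, i):
--             site_hits.append(i)
--         if seq_upper.startswith(rc_site, i):
--             rc_hits.append(i)
--     return site_hits + rc_hits
-- ===== Notes on version B (the rewrite author's own statement) =====
-- stated objective: alternative
-- what changed: Replaces A's per-pattern while-loop of repeated str.find calls with a single pass over all indices 0..len(seq) that tests both patterns with startswith, accumulating the two hit lists at once.
import Mathlib
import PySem

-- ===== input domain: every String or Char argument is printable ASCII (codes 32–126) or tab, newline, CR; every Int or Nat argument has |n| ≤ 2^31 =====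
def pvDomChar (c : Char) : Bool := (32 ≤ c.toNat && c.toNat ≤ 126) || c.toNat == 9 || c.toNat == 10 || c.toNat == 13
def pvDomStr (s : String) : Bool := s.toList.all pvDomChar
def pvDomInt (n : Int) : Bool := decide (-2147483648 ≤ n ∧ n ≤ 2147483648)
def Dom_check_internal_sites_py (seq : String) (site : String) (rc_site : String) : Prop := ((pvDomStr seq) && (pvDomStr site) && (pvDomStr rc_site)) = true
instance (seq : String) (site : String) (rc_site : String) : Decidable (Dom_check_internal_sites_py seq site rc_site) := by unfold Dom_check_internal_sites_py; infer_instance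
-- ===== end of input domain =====

-- B replaces A's per-pattern repeated str.find loops by one scan over all indices
-- testing both patterns with startswith (alternative decomposition, same cost).

-- ===== PORT A =====
-- A's inner 'while True: idx = seq_upper.find(pattern, pos) …' loop; fuel only makes
-- the same computation total (each step fuel covers one find call, len+1 steps suffice).
def pvFindLoop (su pat : List Char) : Nat → Int → List Int
  | 0, _ => []
  | fuel + 1, pos =>
      let idx := PySem.Chars.findFrom su pat pos none
      if idx = -1 then [] else idx :: pvFindLoop su pat fuel (idx + 1)

def check_internal_sites_py (seq : String) (site : String) (rc_site : String) : List Int :=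
  let su := PySem.Chars.upper seq.toList
  List.foldl (fun positions pat => positions ++ pvFindLoop su pat (su.length + 1) 0) []
    [site.toList, rc_site.toList]

-- ===== PORT B =====
-- seq_upper.startswith(p, i) for 0 ≤ i is exactly startswith (drop i) p (start clamps like a slice bound).
def check_internal_sites_py_alt (seq : String) (site : String) (rc_site : String) : List Int :=
  let su := PySem.Chars.upper seq.toList
  let hits :=
    (PySem.List.pyRange 0 ((su.length : Int) + 1) 1).foldl
      (fun (acc : List Int × List Int) i =>
        (if PySem.Chars.startswith (su.drop i.toNat) site.toList then acc.1 ++ [i] else acc.1,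
         if PySem.Chars.startswith (su.drop i.toNat) rc_site.toList then acc.2 ++ [i] else acc.2))
      ([], [])
  hits.1 ++ hits.2

-- ===== PRECONDITION & SPEC =====
def Spec_check_internal_sites_py (seq : String) (site : String) (rc_site : String) (out : List Int) : Prop := out = check_internal_sites_py_alt seq site rc_site
instance (seq : String) (site : String) (rc_site : String) (out : List Int) : Decidable (Spec_check_internal_sites_py seq site rc_site out) := by unfold Spec_check_internal_sites_py; infer_instance

-- ===== CLAIM (what is proved, stated in full; the proofs are below) =====
def Claim_equal_check_internal_sites_py : Prop := ∀ (seq : String) (site : String) (rc_site : String), Dom_check_internal_sites_py seq site rc_site → Spec_check_internal_sites_py seq site rc_site (check_internal_sites_py seq site rc_site)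

-- ===== LEMMAS AND PROOFS =====

-- find(pat, pos) with pos past the end of the string is -1 (CPython rule kept by PySem).
theorem pvFindFrom_past (s sub : List Char) (pos : Int) (h : (s.length : Int) < pos) :
    PySem.Chars.findFrom s sub pos none = -1 := by
  simp only [PySem.Chars.findFrom]
  rw [if_pos]
  split
  · omega
  · omega

-- The while-find loop from position k lists exactly the indices i ∈ [k, len] where pat is a prefix of drop i.
theorem pvFindLoop_eq_filter (su pat : List Char) (fuel k : Nat)
    (hk : k ≤ su.length + 1) (hf : su.length + 1 - k ≤ fuel) :
    pvFindLoop su pat fuel (k : Int) =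
      (PySem.List.pyRange (k : Int) ((su.length : Int) + 1) 1).filter
        (fun i => PySem.Chars.startswith (su.drop i.toNat) pat) := by
  induction fuel generalizing k with
  | zero =>
      have hk' : k = su.length + 1 := by omega
      subst hk'
      simp [pvFindLoop]
  | succ fuel ih =>
      by_cases hle : k ≤ su.length
      · by_cases hneg : PySem.Chars.findFrom su pat (k : Int) none = -1
        · -- no occurrence at or after k
          have hno : ¬ pat <:+: su.drop k :=
            (PySem.Chars.findFrom_natCast_eq_neg_one_iff su pat k hle).mp hneg
          have hfil : (PySem.List.pyRange (k : Int) ((su.length : Int) + 1) 1).filter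
              (fun i => PySem.Chars.startswith (su.drop i.toNat) pat) = [] := by
            rw [List.filter_eq_nil_iff]
            intro i hi
            have hi' := PySem.List.mem_pyRange_one.mp hi
            simp only [Bool.not_eq_true]
            rw [Bool.eq_false_iff]
            intro hsw
            have hpre : pat <+: su.drop i.toNat := (PySem.Chars.startswith_iff _ _).mp hsw
            apply hno
            rw [← PySem.Chars.isIn_iff_infix, ← PySem.Chars.exists_prefix_drop_iff_isIn]
            refine ⟨i.toNat - k, ?_⟩
            rw [List.drop_drop]
            have h2 : k + (i.toNat - k) = i.toNat := by omega
            rw [h2]; exact hpre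
          rw [hfil]
          simp [pvFindLoop, hneg]
        · -- first occurrence at idx = findFrom …
          have hspec := PySem.Chars.findFrom_natCast_spec su pat k hle hneg
          obtain ⟨hge, hpre, hmin⟩ := hspec
          set idx := PySem.Chars.findFrom su pat (k : Int) none with hidx
          have hub : idx ≤ (su.length : Int) := by
            rw [hidx, PySem.Chars.findFrom_natCast su pat k hle]
            have := PySem.Chars.find_le_length (su.drop k) pat
            split <;> simp_all <;> omega
          have hidxnn : 0 ≤ idx := le_trans (by positivity) hge
          have hidxnat : idx = ((idx.toNat : Nat) : Int) := by omega
          -- split the range at idx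
          rw [PySem.List.pyRange_one_append (k : Int) idx ((su.length : Int) + 1) hge (by omega),
              List.filter_append,
              PySem.List.pyRange_one_cons (show idx < (su.length : Int) + 1 by omega)]
          have hfil1 : (PySem.List.pyRange (k : Int) idx 1).filter
              (fun i => PySem.Chars.startswith (su.drop i.toNat) pat) = [] := by
            rw [List.filter_eq_nil_iff]
            intro i hi
            have hi' := PySem.List.mem_pyRange_one.mp hi
            simp only [Bool.not_eq_true]
            rw [Bool.eq_false_iff]
            intro hsw
            exact hmin i.toNat (by omega) (by omega) ((PySem.Chars.startswith_iff _ _).mp hsw)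
          have hsw : PySem.Chars.startswith (su.drop idx.toNat) pat = true :=
            (PySem.Chars.startswith_iff _ _).mpr hpre
          rw [hfil1]
          simp only [List.nil_append, List.filter_cons, hsw, if_pos]
          have hrec : pvFindLoop su pat fuel (idx + 1) =
              (PySem.List.pyRange (idx + 1) ((su.length : Int) + 1) 1).filter
                (fun i => PySem.Chars.startswith (su.drop i.toNat) pat) := by
            have h1 : idx + 1 = ((idx.toNat + 1 : Nat) : Int) := by omega
            rw [h1]
            exact ih (idx.toNat + 1) (by omega) (by omega)
          conv_lhs => rw [pvFindLoop]
          simp [← hidx, hneg, hrec]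
      · -- k = len + 1 : find past the end is -1, the range is empty
        have hk' : k = su.length + 1 := by omega
        subst hk'
        have hcast : ((su.length + 1 : Nat) : Int) = (su.length : Int) + 1 := by push_cast; ring
        have h1 : PySem.Chars.findFrom su pat ((su.length + 1 : Nat) : Int) none = -1 :=
          pvFindFrom_past su pat _ (by push_cast; omega)
        rw [hcast] at h1
        simp [pvFindLoop, hcast, h1, PySem.List.pyRange_one_eq_nil le_rfl]

-- ===== VERDICT (by name: the statement is the Claim_ definition above) =====
theorem check_internal_sites_py_spec : Claim_equal_check_internal_sites_py := by
  intro seq site rc_site _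
  unfold Spec_check_internal_sites_py check_internal_sites_py check_internal_sites_py_alt
  simp only [List.foldl_cons, List.foldl_nil, List.nil_append]
  rw [PySem.List.foldl_prod_mk
        (fun (acc : List Int) (i : Int) =>
          if PySem.Chars.startswith ((PySem.Chars.upper seq.toList).drop i.toNat) site.toList then acc ++ [i] else acc)
        (fun (acc : List Int) (i : Int) =>
          if PySem.Chars.startswith ((PySem.Chars.upper seq.toList).drop i.toNat) rc_site.toList then acc ++ [i] else acc)]
  rw [PySem.List.foldl_append_if
        (fun i : Int => PySem.Chars.startswith ((PySem.Chars.upper seq.toList).drop i.toNat) site.toList)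
        (fun i : Int => i),
      PySem.List.foldl_append_if
        (fun i : Int => PySem.Chars.startswith ((PySem.Chars.upper seq.toList).drop i.toNat) rc_site.toList)
        (fun i : Int => i)]
  simp only [List.map_id', List.nil_append]

  rw [show (0 : Int) = ((0 : Nat) : Int) by norm_num,
      pvFindLoop_eq_filter (PySem.Chars.upper seq.toList) site.toList _ 0 (by omega) (by omega),
      pvFindLoop_eq_filter (PySem.Chars.upper seq.toList) rc_site.toList _ 0 (by omega) (by omega)]
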